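-- pv_equiv track=rewrite | github.com/miliar/Code_Jam_Webscraper | Solutions_python/Problem_201/1600.py | solve
-- ===== SOURCE A (Python) =====
-- def solve(n,k):
--     if k == 0:
--         return 0, n
--     minL = int((n-1)/2)
--     maxL = int(n/2)
--     if k == 1:
--         return maxL, minL
--     k = k - 1
--     return solve(maxL, int(k/2 + 0.5)) if k % 2 == 1 else solve(minL, int(k/2 + 0.5))
-- ===== SOURCE B (Python) =====
-- def solve(n, k):
--     while True:
--         if k == 0:
--             return 0, n
--         if k == 1:
--             return int(n/2), int((n-1)/2)
--         n = int(n/2) if k % 2 == 0 else int((n-1)/2)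
--         k = int(k/2)
-- ===== Notes on version B (the rewrite author's own statement) =====
-- stated objective: simpler
-- what changed: A's self-recursive descent (with the float rounding int(k/2+0.5) after k-=1) is replaced by a flat while-True loop that updates (n, k) in place, choosing the new n by k's parity and halving k toward zero; no self-calls or call stack.
import Mathlib
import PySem

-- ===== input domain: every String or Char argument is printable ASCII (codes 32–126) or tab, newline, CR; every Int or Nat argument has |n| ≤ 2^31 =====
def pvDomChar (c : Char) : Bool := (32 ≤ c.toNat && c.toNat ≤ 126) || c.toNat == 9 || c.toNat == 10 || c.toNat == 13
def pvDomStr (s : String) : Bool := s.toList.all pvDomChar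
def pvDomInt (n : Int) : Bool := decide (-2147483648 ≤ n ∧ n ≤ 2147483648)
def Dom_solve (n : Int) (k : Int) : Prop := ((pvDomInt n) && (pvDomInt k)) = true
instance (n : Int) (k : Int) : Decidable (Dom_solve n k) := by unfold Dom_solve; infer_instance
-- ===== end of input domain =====

-- B rewrites A's tail recursion as a flat iterative loop over the same (n, k) state (objective: simpler).
-- ===== PORT A =====
-- int((n-1)/2), int(n/2): Python float true division then truncation toward zero = Int.tdiv
-- (exact for |n| ≤ 2^31 < 2^53); int(k/2 + 0.5) = (k+1).tdiv 2 (exact on the same range);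
-- Python's k % 2 (floor mod, positive divisor) = Int's % (Int.emod).
def solve (n : Int) (k : Int) : Int × Int :=
  if k = 0 then (0, n)
  else
    let minL := (n - 1).tdiv 2
    let maxL := n.tdiv 2
    if k = 1 then (maxL, minL)
    else
      let k' := k - 1
      if k' % 2 = 1 then solve maxL ((k' + 1).tdiv 2)
      else solve minL ((k' + 1).tdiv 2)
termination_by k.natAbs
decreasing_by
  all_goals
    have h : ((k - 1 + 1).tdiv 2).natAbs = (k - 1 + 1).natAbs / 2 := Int.natAbs_tdiv (k - 1 + 1) 2
    omega

-- ===== PORT B =====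
-- the `while True` loop of Source B: each iteration updates (n, k) in place; int(k/2) = k.tdiv 2.
def solveLoop (n : Int) (k : Int) : Int × Int :=
  if k = 0 then (0, n)
  else if k = 1 then (n.tdiv 2, (n - 1).tdiv 2)
  else solveLoop (if k % 2 = 0 then n.tdiv 2 else (n - 1).tdiv 2) (k.tdiv 2)
termination_by k.natAbs
decreasing_by
  have h : ((k).tdiv 2).natAbs = (k).natAbs / 2 := Int.natAbs_tdiv k 2
  omega

def solve_alt (n : Int) (k : Int) : Int × Int := solveLoop n k

-- ===== PRECONDITION & SPEC =====
def Spec_solve (n : Int) (k : Int) (out : Int × Int) : Prop := out = solve_alt n k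
instance (n : Int) (k : Int) (out : Int × Int) : Decidable (Spec_solve n k out) := by unfold Spec_solve; infer_instance

-- ===== CLAIM (what is proved, stated in full; the proofs are below) =====
def Claim_equal_solve : Prop := ∀ (n : Int) (k : Int), Dom_solve n k → Spec_solve n k (solve n k)

-- ===== LEMMAS AND PROOFS =====

-- ===== VERDICT (by name: the statement is the Claim_ definition above) =====
theorem solve_eq_loop : ∀ (m : Nat) (n k : Int), k.natAbs ≤ m → solve n k = solveLoop n k := by
  intro m
  induction m with
  | zero =>
      intro n k hk
      have hk0 : k = 0 := by omega
      subst hk0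
      rw [solve.eq_def, solveLoop.eq_def]; simp
  | succ m ih =>
      intro n k hk
      rw [solve.eq_def, solveLoop.eq_def]
      by_cases h0 : k = 0
      · simp [h0]
      · by_cases h1 : k = 1
        · simp [h1]
        · simp only [h0, h1, if_false]
          have hk1 : (k - 1 + 1) = k := by omega
          have hb : ((k - 1) % 2 = 1) ↔ (k % 2 = 0) := by omega
          have hrec : solve (n.tdiv 2) (k.tdiv 2) = solveLoop (n.tdiv 2) (k.tdiv 2) := by
            apply ih
            have h : (k.tdiv 2).natAbs = k.natAbs / 2 := Int.natAbs_tdiv k 2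
            omega
          have hrec' : solve ((n - 1).tdiv 2) (k.tdiv 2) = solveLoop ((n - 1).tdiv 2) (k.tdiv 2) := by
            apply ih
            have h : (k.tdiv 2).natAbs = k.natAbs / 2 := Int.natAbs_tdiv k 2
            omega
          by_cases hp : k % 2 = 0
          · simp [hk1, hb.mpr hp, hp, hrec]
          · have : ¬ (k - 1) % 2 = 1 := fun h => hp (hb.mp h)
            simp [hk1, this, hp, hrec']

theorem solve_spec : Claim_equal_solve := by
  intro n k _
  unfold Spec_solve solve_alt
  exact solve_eq_loop k.natAbs n k le_rfl
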